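-- pv_equiv track=rewrite | github.com/6210qwe/leetcode_py | leetcode_solutions/by_id/q1778.py | get_happiness
-- ===== SOURCE A (Python) =====
-- def get_happiness(state1: int, state2: int) -> int:
--     happiness = 0
--     for i in range(3):
--         if state1 & (1 << i):
--             if state2 & (1 << i):
--                 happiness += 60
--             else:
--                 happiness -= 30
--         elif state2 & (1 << i):
--             happiness += 40
--     return happiness
-- ===== SOURCE B (Python) =====
-- def get_happiness(state1: int, state2: int) -> int:
--     both = state1 & state2 & 7
--     only1 = state1 & ~state2 & 7
--     only2 = ~state1 & state2 & 7
--     return 60 * both.bit_count() - 30 * only1.bit_count() + 40 * only2.bit_count()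
-- ===== Notes on version B (the rewrite author's own statement) =====
-- stated objective: idiomatic
-- what changed: Replaced the per-bit loop with three branches by three bitmask intersections restricted to the low 3 bits and a weighted sum of their popcounts (int.bit_count), with no loop or branching.
import Mathlib
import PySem

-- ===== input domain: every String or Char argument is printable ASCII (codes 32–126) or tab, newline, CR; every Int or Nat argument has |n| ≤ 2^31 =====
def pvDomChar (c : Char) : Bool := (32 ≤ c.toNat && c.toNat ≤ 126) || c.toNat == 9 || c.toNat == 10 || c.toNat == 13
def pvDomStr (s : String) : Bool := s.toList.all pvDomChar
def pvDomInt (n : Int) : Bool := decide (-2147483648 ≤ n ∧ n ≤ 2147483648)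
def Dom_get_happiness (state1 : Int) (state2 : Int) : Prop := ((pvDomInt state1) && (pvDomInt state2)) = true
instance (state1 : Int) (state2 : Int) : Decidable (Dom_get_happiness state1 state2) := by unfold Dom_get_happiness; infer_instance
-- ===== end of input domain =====

-- ===== PORT A =====
-- B replaces A's per-bit loop with branches by masked popcounts (objective: idiomatic, same cost).
def get_happiness (state1 : Int) (state2 : Int) : Int :=
  -- happiness = 0; for i in range(3): if state1 & (1 << i): (if state2 & (1 << i): +60 else: -30) elif state2 & (1 << i): +40
  (PySem.List.pyRange 0 3 1).foldl (fun happiness i =>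
    if Int.land state1 ((1 : Int) <<< i) ≠ 0 then
      if Int.land state2 ((1 : Int) <<< i) ≠ 0 then happiness + 60 else happiness - 30
    else if Int.land state2 ((1 : Int) <<< i) ≠ 0 then happiness + 40
    else happiness) 0

-- ===== PORT B =====
-- int.bit_count() hand-ported bit by bit; exact for the values B applies it to (every mask ends in `& 7`, so 0 ≤ m < 8).
def pvPopcnt3 (m : Int) : Int :=
  (if m.testBit 0 then 1 else 0) + (if m.testBit 1 then 1 else 0) + (if m.testBit 2 then 1 else 0)

def get_happiness_alt (state1 : Int) (state2 : Int) : Int :=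
  let both := Int.land (Int.land state1 state2) 7
  let only1 := Int.land (Int.land state1 (Int.lnot state2)) 7
  let only2 := Int.land (Int.land (Int.lnot state1) state2) 7
  60 * pvPopcnt3 both - 30 * pvPopcnt3 only1 + 40 * pvPopcnt3 only2

-- ===== PRECONDITION & SPEC =====
def Spec_get_happiness (state1 : Int) (state2 : Int) (out : Int) : Prop := out = get_happiness_alt state1 state2
instance (state1 : Int) (state2 : Int) (out : Int) : Decidable (Spec_get_happiness state1 state2 out) := by unfold Spec_get_happiness; infer_instance

-- ===== CLAIM (what is proved, stated in full; the proofs are below) =====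
def Claim_equal_get_happiness : Prop := ∀ (state1 : Int) (state2 : Int), Dom_get_happiness state1 state2 → Spec_get_happiness state1 state2 (get_happiness state1 state2)

-- ===== LEMMAS AND PROOFS =====

-- Python truthiness of `a & (1 << k)`: nonzero exactly when bit k of a is set (for any sign of a).
lemma pv_land_pow_ne_zero (a : Int) (k : Nat) :
    (Int.land a (Int.ofNat (2 ^ k)) ≠ 0) ↔ a.testBit k = true := by
  cases a with
  | ofNat m =>
    rw [show Int.land (Int.ofNat m) (Int.ofNat (2 ^ k)) = Int.ofNat (m &&& 2 ^ k) from rfl]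
    rw [Nat.and_two_pow]
    cases h : m.testBit k <;> simp [Int.testBit, h]
  | negSucc m =>
    rw [show Int.land (Int.negSucc m) (Int.ofNat (2 ^ k)) = Int.ofNat (Nat.ldiff (2 ^ k) m) from rfl]
    have hld : Nat.ldiff (2 ^ k) m = if m.testBit k then 0 else 2 ^ k := by
      apply Nat.eq_of_testBit_eq
      intro j
      rw [Nat.testBit_ldiff]
      by_cases hj : j = k
      · subst hj
        cases h : m.testBit j <;> simp [Nat.testBit_two_pow_self]
      · simp [Nat.testBit_two_pow_of_ne (fun h => hj h.symm)]
        split <;> simp [Nat.zero_testBit, Nat.testBit_two_pow_of_ne (fun h => hj h.symm)]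
    rw [hld]
    cases h : m.testBit k <;> simp [Int.testBit, h]

lemma pv_shl (a : Int) (k : Nat) :
    (Int.land a ((1 : Int) <<< ((k : Nat) : Int)) ≠ 0) ↔ a.testBit k = true := by
  rw [Int.one_shiftLeft]
  exact pv_land_pow_ne_zero a k

lemma pv_c0 (a : Int) : (Int.land a ((1 : Int) <<< (0 : Int)) ≠ 0) ↔ a.testBit 0 = true := by
  simpa using pv_shl a 0
lemma pv_c1 (a : Int) : (Int.land a ((1 : Int) <<< (1 : Int)) ≠ 0) ↔ a.testBit 1 = true := by
  simpa using pv_shl a 1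
lemma pv_c2 (a : Int) : (Int.land a ((1 : Int) <<< (2 : Int)) ≠ 0) ↔ a.testBit 2 = true := by
  simpa using pv_shl a 2

lemma pv_testBit7_0 : Int.testBit 7 0 = true := rfl
lemma pv_testBit7_1 : Int.testBit 7 1 = true := rfl
lemma pv_testBit7_2 : Int.testBit 7 2 = true := rfl

-- ===== VERDICT (by name: the statement is the Claim_ definition above) =====
theorem get_happiness_spec : Claim_equal_get_happiness := by
  intro state1 state2 _
  unfold Spec_get_happiness get_happiness get_happiness_alt pvPopcnt3
  rw [show PySem.List.pyRange 0 3 1 = [0, 1, 2] by decide]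
  simp only [List.foldl, pv_c0, pv_c1, pv_c2,
    Int.testBit_land, Int.testBit_lnot, pv_testBit7_0, pv_testBit7_1, pv_testBit7_2,
    Bool.and_true]
  by_cases a0 : state1.testBit 0 <;> by_cases a1 : state1.testBit 1 <;> by_cases a2 : state1.testBit 2 <;>
    by_cases b0 : state2.testBit 0 <;> by_cases b1 : state2.testBit 1 <;> by_cases b2 : state2.testBit 2 <;>
    simp [a0, a1, a2, b0, b1, b2]
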